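-- pv_equiv track=rewrite | github.com/Hattinger04/Kryptografie | columnar_transposition.py | get_order_of_keyword
-- ===== SOURCE A (Python) =====
-- import string
--
-- def get_order_of_keyword(keyword):
--     result = [0] * len(keyword)
--     counter = 0
--     for letter in string.ascii_uppercase:
--         for index, char in enumerate(keyword):
--             if char is letter:
--                 result[index] = counter
--                 counter += 1
--     return result
-- ===== SOURCE B (Python) =====
-- import string
--
-- def get_order_of_keyword(keyword):
--     U = string.ascii_uppercase
--     return [sum(1 for j, d in enumerate(keyword)
--                 if d in U and (d < c or (d == c and j < i))) if c in U else 0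
--             for i, c in enumerate(keyword)]
-- ===== Notes on version B (the rewrite author's own statement) =====
-- stated objective: alternative
-- what changed: Replaces the 26-pass mutating counter sweep with a closed-form per-position rank: each uppercase position's order is the count of uppercase (letter, index) pairs lexicographically smaller than its own, computed in one comprehension with no mutation.
import Mathlib
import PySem

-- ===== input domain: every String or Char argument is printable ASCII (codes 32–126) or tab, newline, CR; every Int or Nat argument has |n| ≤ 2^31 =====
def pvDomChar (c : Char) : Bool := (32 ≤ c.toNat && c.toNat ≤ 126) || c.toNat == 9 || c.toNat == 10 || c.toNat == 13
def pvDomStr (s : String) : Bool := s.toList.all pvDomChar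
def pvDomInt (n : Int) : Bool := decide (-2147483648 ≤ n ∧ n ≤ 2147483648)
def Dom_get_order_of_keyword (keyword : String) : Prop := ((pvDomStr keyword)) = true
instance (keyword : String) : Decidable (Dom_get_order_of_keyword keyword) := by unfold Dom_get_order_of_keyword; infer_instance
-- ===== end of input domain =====

-- B replaces A's 26-pass mutating counter sweep by a closed-form per-position count of
-- lexicographically smaller uppercase (letter, index) pairs (objective: alternative algorithm).

-- ===== PORT A =====
-- string.ascii_uppercase (module constant used by both versions)
def pvUpper : List Char :=
  ['A','B','C','D','E','F','G','H','I','J','K','L','M',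
   'N','O','P','Q','R','S','T','U','V','W','X','Y','Z']

-- Python's `char is letter`: both are CPython-cached 1-character ASCII strings on the
-- printable-ASCII domain, so identity coincides with equality; ported as `==`.
-- `result[index] = counter`: enumerate indices are ≥ 0, so `.toNat` is exact here.
def get_order_of_keyword (keyword : String) : List Int :=
  (pvUpper.foldl
    (fun (st : List Int × Int) letter =>
      (PySem.List.enumerate keyword.toList).foldl
        (fun st p => if p.2 == letter then (st.1.set p.1.toNat st.2, st.2 + 1) else st) st)
    (List.replicate keyword.toList.length (0 : Int), 0)).1

-- ===== PORT B =====
def get_order_of_keyword_alt (keyword : String) : List Int :=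
  (PySem.List.enumerate keyword.toList).map
    (fun p =>
      if pvUpper.contains p.2 then
        (((PySem.List.enumerate keyword.toList).countP
          (fun q => pvUpper.contains q.2 &&
            (decide (q.2 < p.2) || (q.2 == p.2 && decide (q.1 < p.1))))) : Int)
      else 0)

-- ===== PRECONDITION & SPEC =====
def Spec_get_order_of_keyword (keyword : String) (out : List Int) : Prop := out = get_order_of_keyword_alt keyword
instance (keyword : String) (out : List Int) : Decidable (Spec_get_order_of_keyword keyword out) := by unfold Spec_get_order_of_keyword; infer_instance

-- ===== CLAIM (what is proved, stated in full; the proofs are below) =====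
def Claim_equal_get_order_of_keyword : Prop := ∀ (keyword : String), Dom_get_order_of_keyword keyword → Spec_get_order_of_keyword keyword (get_order_of_keyword keyword)

-- ===== LEMMAS AND PROOFS =====
def innerStep (L : Char) (st : List Int × Int) (p : Int × Char) : List Int × Int :=
  if p.2 == L then (st.1.set p.1.toNat st.2, st.2 + 1) else st

theorem cnt_or_disjoint {α : Type} (l : List α) (p q : α → Bool)
    (h : ∀ x ∈ l, ¬(p x = true ∧ q x = true)) :
    l.countP (fun x => p x || q x) = l.countP p + l.countP q := by
  induction l with
  | nil => simp
  | cons x t ih =>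
    have hx := h x (by simp)
    have ht : ∀ y ∈ t, ¬(p y = true ∧ q y = true) := fun y hy => h y (by simp [hy])
    simp only [List.countP_cons, ih ht]
    cases hp : p x <;> cases hq : q x <;> simp_all <;> omega

theorem inner_snd (L : Char) (ps : List (Int × Char)) (r : List Int) (c : Int) :
    (ps.foldl (innerStep L) (r, c)).2 = c + ps.countP (fun p => p.2 == L) := by
  induction ps generalizing r c with
  | nil => simp
  | cons p t ih =>
    simp only [List.foldl_cons, List.countP_cons, innerStep]
    by_cases h : p.2 == L
    · simp only [h, if_pos rfl]; rw [ih]; simp; omega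
    · simp only [h]; rw [if_neg (by simpa using h), ih]; simp [h]

theorem inner_len (L : Char) (ps : List (Int × Char)) (r : List Int) (c : Int) :
    (ps.foldl (innerStep L) (r, c)).1.length = r.length := by
  induction ps generalizing r c with
  | nil => simp
  | cons p t ih =>
    simp only [List.foldl_cons, innerStep]
    by_cases h : p.2 == L
    · simp only [h, if_pos rfl]; rw [ih]; simp
    · rw [if_neg (by simpa using h), ih]

theorem inner_get_ne (L : Char) (ps : List (Int × Char)) (r : List Int) (c : Int) (i : Nat)
    (h : ∀ p ∈ ps, p.2 = L → p.1.toNat ≠ i) :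
    (ps.foldl (innerStep L) (r, c)).1[i]? = r[i]? := by
  induction ps generalizing r c with
  | nil => simp
  | cons p t ih =>
    simp only [List.foldl_cons, innerStep]
    by_cases hp : p.2 == L
    · simp only [hp, if_pos rfl]
      rw [ih _ _ (fun q hq => h q (by simp [hq]))]
      exact List.getElem?_set_ne (h p (by simp) (by simpa using hp))
    · rw [if_neg (by simpa using hp)]
      exact ih _ _ (fun q hq => h q (by simp [hq]))


theorem enum_append (u v : List Char) (s : Int) :
    PySem.List.enumerate (u ++ v) s =
      PySem.List.enumerate u s ++ PySem.List.enumerate v (s + u.length) := by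
  induction u generalizing s with
  | nil => simp [PySem.List.enumerate]
  | cons x t ih =>
    simp only [List.cons_append, PySem.List.enumerate, ih, List.length_cons]
    congr 2
    push_cast; ring

theorem enum_mem (cs : List Char) (s : Int) (p : Int × Char) (h : p ∈ PySem.List.enumerate cs s) :
    ∃ j, ∃ hj : j < cs.length, p.1 = s + j ∧ p.2 = cs[j]'hj := by
  induction cs generalizing s with
  | nil => simp [PySem.List.enumerate] at h
  | cons x t ih =>
    simp only [PySem.List.enumerate, List.mem_cons] at h
    rcases h with h | h
    · exact ⟨0, by simp, by simp [h]⟩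
    · obtain ⟨j, hj, h1, h2⟩ := ih (s+1) h
      refine ⟨j+1, by simpa using hj, ?_, by simpa using h2⟩
      rw [h1]; push_cast; ring

theorem cntE (cs : List Char) (s : Int) (P : Char → Bool) :
    (PySem.List.enumerate cs s).countP (fun q => P q.2) = cs.countP P := by
  induction cs generalizing s with
  | nil => simp [PySem.List.enumerate]
  | cons x t ih => simp [PySem.List.enumerate, List.countP_cons, ih]

theorem inner_hit (L : Char) (cs : List Char) (r : List Int) (c : Int) (i : Nat)
    (hi : i < cs.length) (hL : cs[i] = L) (hr : r.length = cs.length) :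
    ((PySem.List.enumerate cs).foldl (innerStep L) (r, c)).1[i]? =
      some (c + ((cs.take i).countP (fun d => d == L) : Int)) := by
  have hsplit : cs = cs.take i ++ cs[i] :: cs.drop (i + 1) := by
    conv_lhs => rw [← List.take_append_drop i cs]
    rw [List.drop_eq_getElem_cons hi]
  have hlen : (cs.take i).length = i := by simp; omega
  conv_lhs => rw [hsplit]
  rw [enum_append, List.foldl_append]
  have hE1len : ∀ p ∈ PySem.List.enumerate (cs.take i) 0, p.1.toNat < i := by
    intro p hp
    obtain ⟨j, hj, h1, _⟩ := enum_mem _ _ _ hp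
    rw [hlen] at hj; omega
  set st1 := (PySem.List.enumerate (cs.take i)).foldl (innerStep L) (r, c) with hst1
  have hst1len : st1.1.length = cs.length := by rw [hst1, inner_len, hr]
  have hst1snd : st1.2 = c + ((cs.take i).countP (fun d => d == L) : Int) := by
    rw [hst1, inner_snd]
    congr 1
    exact_mod_cast congrArg (Nat.cast (R := ℤ)) (cntE (cs.take i) 0 (fun d => d == L))
  rw [hlen]
  show ((PySem.List.enumerate (cs[i] :: cs.drop (i + 1)) (0 + i)).foldl (innerStep L) st1).1[i]? = _
  have hcons : PySem.List.enumerate (cs[i] :: cs.drop (i + 1)) (0 + (i : Int)) =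
      ((0 + (i : Int)), cs[i]) :: PySem.List.enumerate (cs.drop (i + 1)) (0 + i + 1) := rfl
  rw [hcons, List.foldl_cons]
  have hmid : innerStep L st1 (0 + (i : Int), cs[i]) = (st1.1.set i st1.2, st1.2 + 1) := by
    simp [innerStep, hL]
  rw [hmid]
  rw [inner_get_ne]
  · rw [List.getElem?_set_self (by rw [hst1len]; exact hi), hst1snd]
  · intro p hp _
    obtain ⟨j, hj, h1, _⟩ := enum_mem _ _ _ hp
    omega

theorem inner_miss (L : Char) (cs : List Char) (r : List Int) (c : Int) (i : Nat)
    (hi : i < cs.length) (hL : cs[i] ≠ L) :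
    ((PySem.List.enumerate cs).foldl (innerStep L) (r, c)).1[i]? = r[i]? := by
  apply inner_get_ne
  intro p hp hpL
  obtain ⟨j, hj, h1, h2⟩ := enum_mem _ _ _ hp
  intro hcon
  have : j = i := by omega
  subst this
  exact hL (by rw [← h2, hpL])

theorem cntE_lt (cs : List Char) (s i : Int) (P : Char → Bool) :
    (PySem.List.enumerate cs s).countP (fun q => P q.2 && decide (q.1 < i)) =
      (cs.take (i - s).toNat).countP P := by
  induction cs generalizing s with
  | nil => simp [PySem.List.enumerate]
  | cons x t ih =>
    simp only [PySem.List.enumerate, List.countP_cons, ih]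
    by_cases hs : s < i
    · have : (i - s).toNat = ((i - (s+1)).toNat) + 1 := by omega
      rw [this]
      simp only [List.take_succ_cons, List.countP_cons, hs, decide_true]
      cases P x <;> simp <;> omega
    · have h0 : (i - s).toNat = 0 := by omega
      have h1 : (i - (s+1)).toNat = 0 := by omega
      rw [h0, h1]
      simp [hs]

theorem outer_inv (cs : List Char) (LS : List Char) (hs : LS.Pairwise (· < ·)) :
    (LS.foldl (fun st L => (PySem.List.enumerate cs).foldl (innerStep L) st)
        (List.replicate cs.length (0 : Int), 0)).2
      = ((cs.countP (fun d => LS.contains d) : Int)) ∧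
    (LS.foldl (fun st L => (PySem.List.enumerate cs).foldl (innerStep L) st)
        (List.replicate cs.length (0 : Int), 0)).1.length = cs.length ∧
    ∀ i, ∀ hi : i < cs.length,
      (LS.foldl (fun st L => (PySem.List.enumerate cs).foldl (innerStep L) st)
          (List.replicate cs.length (0 : Int), 0)).1[i]?
        = some (if LS.contains (cs[i]'hi) then
            (((PySem.List.enumerate cs).countP
              (fun q => LS.contains q.2 &&
                (decide (q.2 < cs[i]'hi) || (q.2 == cs[i]'hi && decide (q.1 < (i : Int)))))) : Int)
          else 0) := by
  induction LS using List.reverseRecOn with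
  | nil =>
    refine ⟨by simp, by simp, ?_⟩
    intro i hi
    simp [List.getElem?_replicate, hi]
  | append_singleton LS L ih =>
    rw [List.pairwise_append] at hs
    obtain ⟨hLS, -, hlt⟩ := hs
    have hltL : ∀ d ∈ LS, d < L := fun d hd => hlt d hd L (by simp)
    have hneL : ∀ d ∈ LS, d ≠ L := fun d hd => ne_of_lt (hltL d hd)
    obtain ⟨ihsnd, ihlen, ihget⟩ := ih hLS
    simp only [List.foldl_append, List.foldl_cons, List.foldl_nil] at *
    set st := LS.foldl (fun st L => (PySem.List.enumerate cs).foldl (innerStep L) st)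
        (List.replicate cs.length (0 : Int), 0) with hst
    have hcontains : ∀ d : Char, (LS ++ [L]).contains d = (LS.contains d || d == L) := by
      intro d
      by_cases h : d ∈ LS <;> by_cases h2 : d = L <;> simp [h, h2]
    have cntE_LS : (PySem.List.enumerate cs).countP (fun q => LS.contains q.2)
        = cs.countP (fun d => LS.contains d) := cntE cs 0 (fun d => LS.contains d)
    have cntE_L : (PySem.List.enumerate cs).countP (fun p => p.2 == L)
        = cs.countP (fun d => d == L) := cntE cs 0 (fun d => d == L)
    refine ⟨?_, ?_, ?_⟩
    · -- snd
      have hrw : ((PySem.List.enumerate cs).foldl (innerStep L) st) =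
          ((PySem.List.enumerate cs).foldl (innerStep L) (st.1, st.2)) := rfl
      rw [hrw, inner_snd, cntE_L, ihsnd]
      have hdisj : cs.countP (fun d => LS.contains d || d == L) =
          cs.countP (fun d => LS.contains d) + cs.countP (fun d => d == L) := by
        apply cnt_or_disjoint
        intro d _ ⟨h1, h2⟩
        exact hneL d (by simpa using h1) (by simpa using h2)
      have hcc : cs.countP (fun d => (LS ++ [L]).contains d)
          = cs.countP (fun d => LS.contains d || d == L) :=
        List.countP_congr (fun x _ => by rw [hcontains x])
      rw [hcc, hdisj]; push_cast; ring
    · -- length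
      have hrw : ((PySem.List.enumerate cs).foldl (innerStep L) st) =
          ((PySem.List.enumerate cs).foldl (innerStep L) (st.1, st.2)) := rfl
      rw [hrw, inner_len, ihlen]
    · -- values
      intro i hi
      have hrw : ((PySem.List.enumerate cs).foldl (innerStep L) st) =
          ((PySem.List.enumerate cs).foldl (innerStep L) (st.1, st.2)) := rfl
      rw [hrw]
      by_cases hiL : cs[i]'hi = L
      · -- position written in this pass
        rw [inner_hit L cs st.1 st.2 i hi hiL ihlen, ihsnd]
        have hc : (LS ++ [L]).contains (cs[i]'hi) = true := by
          rw [hcontains]; simp [hiL]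
        rw [if_pos hc]
        congr 1
        have hpt : ∀ q : Int × Char,
            ((LS ++ [L]).contains q.2 &&
              (decide (q.2 < cs[i]'hi) || (q.2 == cs[i]'hi && decide (q.1 < (i : Int)))))
            = (LS.contains q.2 || (q.2 == L && decide (q.1 < (i : Int)))) := by
          intro q
          rw [hcontains, hiL]
          by_cases hq : q.2 ∈ LS
          · have h1 : decide (q.2 ∈ LS) = true := by simpa using hq
            have h2 : decide (q.2 < L) = true := by simp [hltL q.2 hq]
            simp [h1, h2]
          · have h1 : decide (q.2 ∈ LS) = false := by simpa using hq
            by_cases hqL : q.2 = L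
            · rw [hqL] at h1 ⊢
              simp [h1]
            · simp [h1, beq_eq_false_iff_ne.mpr hqL]
        have hptc : (PySem.List.enumerate cs).countP
            (fun q => (LS ++ [L]).contains q.2 &&
              (decide (q.2 < cs[i]'hi) || (q.2 == cs[i]'hi && decide (q.1 < (i : Int)))))
            = (PySem.List.enumerate cs).countP
              (fun q => LS.contains q.2 || (q.2 == L && decide (q.1 < (i : Int)))) :=
          List.countP_congr (fun x _ => by rw [hpt x])
        rw [hptc]
        have hsplit : (PySem.List.enumerate cs).countP
            (fun q => LS.contains q.2 || (q.2 == L && decide (q.1 < (i : Int))))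
            = (PySem.List.enumerate cs).countP (fun q => LS.contains q.2)
              + (PySem.List.enumerate cs).countP (fun q => q.2 == L && decide (q.1 < (i : Int))) := by
          apply cnt_or_disjoint
          intro q _ ⟨h1, h2⟩
          exact hneL q.2 (by simpa using h1) (by simpa using (Bool.and_elim_left h2))
        have cntE_lt_L : (PySem.List.enumerate cs).countP
            (fun q => q.2 == L && decide (q.1 < (i : Int)))
            = (cs.take ((i : Int) - 0).toNat).countP (fun d => d == L) := cntE_lt cs 0 i (fun d => d == L)
        have htn : ((i : Int) - 0).toNat = i := by omega
        rw [hsplit, cntE_LS, cntE_lt_L, htn]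
        push_cast
        ring
      · -- position untouched in this pass
        rw [inner_miss L cs st.1 st.2 i hi hiL, ihget i hi]
        by_cases hd : LS.contains (cs[i]'hi)
        · have hc : (LS ++ [L]).contains (cs[i]'hi) = true := by
            rw [hcontains]; simp only [Bool.or_eq_true, beq_iff_eq]
            exact Or.inl hd
          rw [if_pos hd, if_pos hc]
          congr 2
          have hiLS : cs[i]'hi ∈ LS := by simpa using hd
          have hiLt : cs[i]'hi < L := hltL _ hiLS
          apply List.countP_congr
          intro q _
          rw [hcontains]
          by_cases hq : q.2 ∈ LS
          · have h1 : decide (q.2 ∈ LS) = true := by simpa using hq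
            simp [h1]
          · have h1 : decide (q.2 ∈ LS) = false := by simpa using hq
            by_cases hqL : q.2 = L
            · rw [hqL] at h1 ⊢
              have hnlt : ¬ (L < cs[i]'hi) := not_lt.mpr (le_of_lt hiLt)
              simp [h1, hnlt, beq_iff_eq, (ne_of_gt hiLt : L ≠ cs[i]'hi)]
            · simp [h1, beq_eq_false_iff_ne.mpr hqL]
        · have hc : (LS ++ [L]).contains (cs[i]'hi) = false := by
            rw [hcontains]
            simp only [Bool.or_eq_false_iff, beq_eq_false_iff_ne, ne_eq]
            exact ⟨by simpa using hd, hiL⟩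
          rw [if_neg (by simpa using hd), if_neg (by rw [hc]; simp)]




theorem enum_getElem? (cs : List Char) (s : Int) (i : Nat) (h : i < cs.length) :
    (PySem.List.enumerate cs s)[i]? = some (s + i, cs[i]'h) := by
  induction cs generalizing s i with
  | nil => simp at h
  | cons x t ih =>
    cases i with
    | zero => simp [PySem.List.enumerate]
    | succ k =>
      have hk : k < t.length := by simpa using h
      show (PySem.List.enumerate t (s+1))[k]? = _
      rw [ih (s+1) k hk]
      have : s + 1 + (k : Int) = s + ((k : Nat) + 1 : Nat) := by push_cast; ring
      simp [this]
    
theorem pv_main (keyword : String) :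
    get_order_of_keyword keyword = get_order_of_keyword_alt keyword := by
  have hpw : pvUpper.Pairwise (· < ·) := by decide
  obtain ⟨-, hlen, hget⟩ := outer_inv keyword.toList pvUpper hpw
  apply List.ext_getElem?
  intro i
  by_cases hi : i < keyword.toList.length
  · have hA : (get_order_of_keyword keyword)[i]? =
        (pvUpper.foldl (fun st L => (PySem.List.enumerate keyword.toList).foldl (innerStep L) st)
          (List.replicate keyword.toList.length (0 : Int), 0)).1[i]? := rfl
    rw [hA, hget i hi]
    have hE : (PySem.List.enumerate keyword.toList)[i]? =
        some (((i : Int)), keyword.toList[i]'hi) := by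
      rw [enum_getElem? keyword.toList 0 i hi]; simp
    unfold get_order_of_keyword_alt
    rw [List.getElem?_map, hE, Option.map_some]
  · have h1 : (get_order_of_keyword keyword).length = keyword.toList.length := hlen
    have h2 : (get_order_of_keyword_alt keyword).length = keyword.toList.length := by
      unfold get_order_of_keyword_alt
      rw [List.length_map, PySem.List.length_enumerate]
    rw [List.getElem?_eq_none (by omega), List.getElem?_eq_none (by omega)]

-- ===== VERDICT (by name: the statement is the Claim_ definition above) =====
theorem get_order_of_keyword_spec : Claim_equal_get_order_of_keyword := by
  intro keyword _
  unfold Spec_get_order_of_keyword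
  exact pv_main keyword
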